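-- pv_equiv track=rewrite | github.com/astropy/reproject | reproject/array_utils.py | find_chunk_shape
-- ===== SOURCE A (Python) =====
-- def find_chunk_shape(shape, max_chunk_size=None):
--     """
--     Given the shape of an n-dimensional array, and the maximum number of
--     elements in a chunk, return the largest chunk shape to use for iteration.
--
--     This currently assumes the optimal chunk shape to return is for C-contiguous
--     arrays.
--
--     Parameters
--     ----------
--     shape : iterable
--         The shape of the n-dimensional array.
--     max_chunk_size : int, optional
--         The maximum number of elements per chunk.
--     """
--
--     if max_chunk_size is None:
--         return tuple(shape)
--
--     block_shape = []
--
--     max_repeat_remaining = max_chunk_size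
--
--     for size in shape[::-1]:
--         if max_repeat_remaining > size:
--             block_shape.append(size)
--             max_repeat_remaining = max_repeat_remaining // size
--         else:
--             block_shape.append(max_repeat_remaining)
--             max_repeat_remaining = 1
--
--     return tuple(block_shape[::-1])
-- ===== SOURCE B (Python) =====
-- def find_chunk_shape(shape, max_chunk_size=None):
--     # Table-build-then-locate: the prefix products of the reversed shape give
--     # every step's remaining budget directly as max_chunk_size // prefix[i],
--     # so the chunk shape is: full sizes before the single cut index, the
--     # remaining quotient at the cut, and 1 for every dimension after it.
--     if max_chunk_size is None:
--         return tuple(shape)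
--
--     rev = list(shape)[::-1]
--     prefix = [1]
--     for size in rev:
--         prefix.append(prefix[-1] * size)
--
--     cut = next((i for i in range(len(rev)) if max_chunk_size // prefix[i] <= rev[i]), None)
--     if cut is None:
--         return tuple(shape)
--
--     out = rev[:cut] + [max_chunk_size // prefix[cut]] + [1] * (len(rev) - cut - 1)
--     return tuple(out[::-1])
-- ===== Notes on version B (the rewrite author's own statement) =====
-- stated objective: alternative
-- what changed: Replaces A's stateful running-budget scan by a table-build-then-locate pass: precompute the prefix products of the reversed shape, locate the single cut index i = first position with max_chunk_size // prefix[i] <= rev[i] (using (a//b)//c == a//(b*c) for positive sizes), and assemble the result by slicing: full sizes before the cut, the quotient at the cut, 1 after; Pre_ restricts to the natural domain of shapes (all sizes >= 1): sizes of 0 make A raise ZeroDivisionError and negative sizes are not array dimensions.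
-- outside the precondition, e.g. on find_chunk_shape([-2, 3], 2): A returns (-2, 2), B returns (1, 2); on find_chunk_shape([0], -1): A returns (-1,), B returns (-1,)
import Mathlib
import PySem

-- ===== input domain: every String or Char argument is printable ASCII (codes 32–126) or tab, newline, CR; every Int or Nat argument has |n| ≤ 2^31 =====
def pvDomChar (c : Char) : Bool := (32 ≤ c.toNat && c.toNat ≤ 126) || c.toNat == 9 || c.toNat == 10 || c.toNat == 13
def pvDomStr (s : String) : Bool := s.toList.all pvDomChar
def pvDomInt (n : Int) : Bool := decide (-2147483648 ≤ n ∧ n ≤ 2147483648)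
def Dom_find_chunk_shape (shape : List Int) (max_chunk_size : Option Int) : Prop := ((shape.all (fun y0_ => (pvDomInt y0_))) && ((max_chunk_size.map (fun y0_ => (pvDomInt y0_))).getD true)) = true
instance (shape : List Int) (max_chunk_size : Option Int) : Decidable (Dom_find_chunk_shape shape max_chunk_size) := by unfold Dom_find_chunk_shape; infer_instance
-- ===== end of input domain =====

-- B replaces A's stateful running-budget scan by a table-build-then-locate pass:
-- prefix products of the reversed shape, one cut index located in the table, and
-- the output assembled by slicing (objective: alternative decomposition, same O(n)).

-- ===== PORT A =====
-- A's loop body: append the size (budget still exceeds it) or the leftover budget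
def fcsStep (st : List Int × Int) (size : Int) : List Int × Int :=
  if st.2 > size then (st.1 ++ [size], PySem.Int.floordiv st.2 size)
  else (st.1 ++ [st.2], 1)

def find_chunk_shape (shape : List Int) (max_chunk_size : Option Int) : List Int :=
  match max_chunk_size with
  | none => shape
  | some m => ((shape.reverse.foldl fcsStep ([], m)).1).reverse

-- ===== PORT B =====
-- Source B's prefix-product loop: the running products of rev, i.e. prefix[1:]
def fcsPrefixes (p : Int) : List Int → List Int
  | [] => []
  | s :: rest => (p * s) :: fcsPrefixes (p * s) rest

def find_chunk_shape_alt (shape : List Int) (max_chunk_size : Option Int) : List Int :=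
  match max_chunk_size with
  | none => shape
  | some m =>
    -- locate the cut: first i with m // prefix[i] <= rev[i]
    match ((shape.reverse).zip (1 :: fcsPrefixes 1 shape.reverse)).findIdx?
        (fun sp => PySem.Int.floordiv m sp.2 ≤ sp.1) with
    | none => shape
    | some i =>
      ((shape.reverse).take i
        ++ [PySem.Int.floordiv m ((1 :: fcsPrefixes 1 shape.reverse).getD i 1)]
        ++ List.replicate (shape.reverse.length - i - 1) 1).reverse

-- ===== PRECONDITION & SPEC =====
-- Pre_ restricts to the natural domain of array shapes: when a budget is given,
-- every dimension size must be at least 1 — a size of 0 makes A raise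
-- ZeroDivisionError whenever its running budget is still positive, and negative
-- sizes are not array dimensions (A's values there are accidents of its running
-- floor division, which B does not reproduce).
def Pre_find_chunk_shape (shape : List Int) (max_chunk_size : Option Int) : Prop :=
  max_chunk_size = none ∨ ∀ s ∈ shape, 1 ≤ s

instance (shape : List Int) (max_chunk_size : Option Int) : Decidable (Pre_find_chunk_shape shape max_chunk_size) := by
  unfold Pre_find_chunk_shape; infer_instance

def pvWitness_find_chunk_shape : List Int × Option Int := ([2, 3, 4], some 10)

def Spec_find_chunk_shape (shape : List Int) (max_chunk_size : Option Int) (out : List Int) : Prop := out = find_chunk_shape_alt shape max_chunk_size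
instance (shape : List Int) (max_chunk_size : Option Int) (out : List Int) : Decidable (Spec_find_chunk_shape shape max_chunk_size out) := by unfold Spec_find_chunk_shape; infer_instance

-- ===== CLAIM (what is proved, stated in full; the proofs are below) =====
def Claim_equal_find_chunk_shape : Prop := ∀ (shape : List Int) (max_chunk_size : Option Int), Dom_find_chunk_shape shape max_chunk_size → Pre_find_chunk_shape shape max_chunk_size → Spec_find_chunk_shape shape max_chunk_size (find_chunk_shape shape max_chunk_size)

-- ===== LEMMAS AND PROOFS =====

-- reference form both sides are reduced to: divide down to the cut, 1s after it
def fcsRef (m p : Int) : List Int → List Int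
  | [] => []
  | s :: rest =>
    if PySem.Int.floordiv m p > s then s :: fcsRef m (p * s) rest
    else PySem.Int.floordiv m p :: List.replicate rest.length 1

-- once the budget is exhausted A's residual is 1; with sizes ≥ 1 it emits only 1s
theorem fcs_ones (rest : List Int) : ∀ acc : List Int, (∀ s ∈ rest, 1 ≤ s) →
    (rest.foldl fcsStep (acc, 1)).1 = acc ++ List.replicate rest.length 1 := by
  induction rest with
  | nil => intro acc _; simp
  | cons s rest ih =>
    intro acc h
    have hs : 1 ≤ s := h s List.mem_cons_self
    have h' : ∀ t ∈ rest, 1 ≤ t := fun t ht => h t (List.mem_cons_of_mem _ ht)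
    simp only [List.foldl_cons, fcsStep, if_neg (by omega : ¬ (1:Int) > s)]
    rw [ih (acc ++ [1]) h']
    simp [List.replicate_succ]

-- A's fold from residual m // p equals the reference (sizes ≥ 1, p ≥ 1),
-- via the floor-division identity (m // p) // s = m // (p * s)
theorem fcs_fold_eq_ref (rev : List Int) : ∀ (acc : List Int) (m p : Int), 0 < p →
    (∀ s ∈ rev, 1 ≤ s) →
    (rev.foldl fcsStep (acc, PySem.Int.floordiv m p)).1 = acc ++ fcsRef m p rev := by
  induction rev with
  | nil => intro acc m p _ _; simp [fcsRef]
  | cons s rest ih =>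
    intro acc m p hp h
    have hs : 1 ≤ s := h s List.mem_cons_self
    have h' : ∀ t ∈ rest, 1 ≤ t := fun t ht => h t (List.mem_cons_of_mem _ ht)
    by_cases hc : PySem.Int.floordiv m p > s
    · have hdiv : PySem.Int.floordiv (PySem.Int.floordiv m p) s = PySem.Int.floordiv m (p * s) := by
        rw [PySem.Int.floordiv_eq_ediv_of_pos hp, PySem.Int.floordiv_eq_ediv_of_pos (by omega),
            PySem.Int.floordiv_eq_ediv_of_pos (by positivity)]
        exact Int.ediv_ediv_of_nonneg (by omega)
      simp only [List.foldl_cons, fcsStep, if_pos hc, fcsRef, hdiv]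
      rw [ih (acc ++ [s]) m (p * s) (by positivity) h']
      simp
    · simp only [List.foldl_cons, fcsStep, if_neg hc, fcsRef]
      rw [fcs_ones rest (acc ++ [PySem.Int.floordiv m p]) h']
      simp

-- B's table-and-cut construction equals the reference (pure list structure)
theorem fcs_table_eq_ref (rev : List Int) : ∀ m p : Int,
    (match (rev.zip (p :: fcsPrefixes p rev)).findIdx?
        (fun sp => PySem.Int.floordiv m sp.2 ≤ sp.1) with
     | none => rev
     | some i => rev.take i ++ [PySem.Int.floordiv m ((p :: fcsPrefixes p rev).getD i 1)]
         ++ List.replicate (rev.length - i - 1) 1)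
    = fcsRef m p rev := by
  induction rev with
  | nil => intro m p; simp [fcsRef]
  | cons s rest ih =>
    intro m p
    by_cases hc : PySem.Int.floordiv m p ≤ s
    · simp only [fcsPrefixes, List.zip_cons_cons, List.findIdx?_cons, decide_eq_true_eq,
        if_pos hc, fcsRef, if_neg (by omega : ¬ PySem.Int.floordiv m p > s)]
      simp
    · have := ih m (p * s)
      simp only [fcsPrefixes, List.zip_cons_cons, List.findIdx?_cons, decide_eq_true_eq,
        if_neg hc, fcsRef, if_pos (by omega : PySem.Int.floordiv m p > s)]
      cases hfi : (rest.zip ((p * s) :: fcsPrefixes (p * s) rest)).findIdx?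
          (fun sp => PySem.Int.floordiv m sp.2 ≤ sp.1) with
      | none => rw [hfi] at this; simpa using this
      | some j =>
        rw [hfi] at this
        simp only [Option.map_some]
        rw [← this]
        simp

-- ===== VERDICT (by name: the statement is the Claim_ definition above) =====
theorem find_chunk_shape_spec : Claim_equal_find_chunk_shape := by
  intro shape mcs _hdom hpre
  unfold Spec_find_chunk_shape
  match mcs with
  | none => rfl
  | some m =>
    have hpos : ∀ s ∈ shape.reverse, 1 ≤ s := by
      rcases hpre with h | h
      · cases h
      · intro s hs; exact h s (List.mem_reverse.mp hs)
    have hA : find_chunk_shape shape (some m) = (fcsRef m 1 shape.reverse).reverse := by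
      simp only [find_chunk_shape]
      rw [show m = PySem.Int.floordiv m 1 by
            rw [PySem.Int.floordiv_eq_ediv_of_pos Int.one_pos, Int.ediv_one],
          fcs_fold_eq_ref shape.reverse [] m 1 Int.one_pos hpos]
      simp
    have hB := fcs_table_eq_ref shape.reverse m 1
    rw [hA]
    simp only [find_chunk_shape_alt]
    cases hfi : (shape.reverse.zip (1 :: fcsPrefixes 1 shape.reverse)).findIdx?
        (fun sp => PySem.Int.floordiv m sp.2 ≤ sp.1) with
    | none =>
      rw [hfi] at hB
      simp only at hB
      rw [← hB]
      simp
    | some i =>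
      rw [hfi] at hB
      simp only at hB
      rw [← hB]
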